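-- pv_equiv track=rewrite | github.com/alhoo/pyq | jf/parser.py | merge_lambdas
-- ===== SOURCE A (Python) =====
-- def merge_lambdas(arr):
--     """Merge jf lambdas to mappers and filters"""
--     ret = 'lambda x, *rest: ('
--     rest = False
--     first = True
--     for val, keep in arr:
--         if not keep and not rest:
--             ret += '), arr'
--             rest = True
--         if not first:
--             ret += ', '
--         ret += val
--         first = False
--     if first:
--         ret += 'arr'
--     elif not rest:
--         ret += '), arr'
--     return ret
-- ===== SOURCE B (Python) =====
-- def merge_lambdas(arr):
--     """Merge jf lambdas to mappers and filters"""
--     base = 'lambda x, *rest: ('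
--     if not arr:
--         return base + 'arr'
--     vals = [v for v, _ in arr]
--     s = next((i for i, (_, keep) in enumerate(arr) if not keep), None)
--     if s is None:
--         return base + ', '.join(vals) + '), arr'
--     if s == 0:
--         return base + '), arr' + ', '.join(vals)
--     return base + ', '.join(vals[:s]) + '), arr, ' + ', '.join(vals[s:])
-- ===== Notes on version B (the rewrite author's own statement) =====
-- stated objective: simpler
-- what changed: Replaces A's streaming concatenation loop with rest/first flags by locating the index of the first filter element and assembling the result from joined slices (no filter / filter-first / filter-later cases).
import Mathlib
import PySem

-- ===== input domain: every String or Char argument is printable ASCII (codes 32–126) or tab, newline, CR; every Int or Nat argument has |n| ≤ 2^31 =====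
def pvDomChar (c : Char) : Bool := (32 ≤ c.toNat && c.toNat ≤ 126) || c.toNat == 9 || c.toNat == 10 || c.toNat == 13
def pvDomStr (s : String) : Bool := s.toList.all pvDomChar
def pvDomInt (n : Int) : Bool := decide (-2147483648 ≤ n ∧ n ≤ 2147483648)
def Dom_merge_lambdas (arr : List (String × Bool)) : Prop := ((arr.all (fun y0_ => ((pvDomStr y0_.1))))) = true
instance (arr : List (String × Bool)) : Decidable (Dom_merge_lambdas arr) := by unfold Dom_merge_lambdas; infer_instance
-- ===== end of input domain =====

-- B replaces A's streaming += loop with two booleans by a locate-the-first-filter-then-join assembly (objective: simpler decomposition, same cost).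


-- ===== PORT A =====
-- A's for-loop over arr threading (ret, rest, first)
def mlLoop : List (String × Bool) → String → Bool → Bool → String × Bool × Bool
  | [], ret, rest, first => (ret, rest, first)
  | (val, keep) :: t, ret, rest, first =>
    let ret1 := if !keep && !rest then ret ++ "), arr" else ret
    let rest1 := if !keep && !rest then true else rest
    let ret2 := if !first then ret1 ++ ", " else ret1
    mlLoop t (ret2 ++ val) rest1 false

def merge_lambdas (arr : List (String × Bool)) : String :=
  let st := mlLoop arr "lambda x, *rest: (" false true
  if st.2.2 then st.1 ++ "arr"
  else if !st.2.1 then st.1 ++ "), arr"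
  else st.1

-- ===== PORT B =====
def merge_lambdas_alt (arr : List (String × Bool)) : String :=
  let base := "lambda x, *rest: ("
  match arr with
  | [] => base ++ "arr"
  | _ :: _ =>
    let vals := arr.map (·.1)
    match arr.findIdx? (fun p => !p.2) with
    | none => base ++ PySem.Str.join ", " vals ++ "), arr"
    | some 0 => base ++ "), arr" ++ PySem.Str.join ", " vals
    | some s => base ++ PySem.Str.join ", " (vals.take s) ++ "), arr, " ++ PySem.Str.join ", " (vals.drop s)

-- ===== PRECONDITION & SPEC =====
def Spec_merge_lambdas (arr : List (String × Bool)) (out : String) : Prop := out = merge_lambdas_alt arr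
instance (arr : List (String × Bool)) (out : String) : Decidable (Spec_merge_lambdas arr out) := by unfold Spec_merge_lambdas; infer_instance

-- ===== CLAIM (what is proved, stated in full; the proofs are below) =====
def Claim_equal_merge_lambdas : Prop := ∀ (arr : List (String × Bool)), Dom_merge_lambdas arr → Spec_merge_lambdas arr (merge_lambdas arr)

-- ===== LEMMAS AND PROOFS =====
-- the tail of a comma-joined list: one ", " ++ value per element
def Js : List String → String
  | [] => ""
  | x :: t => ", " ++ x ++ Js t

theorem js_toList : ∀ (l : List String) (v : String),
    (PySem.Str.join ", " (v :: l)).toList = v.toList ++ (Js l).toList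
  | [], v => by
    simp [PySem.Str.toList_join, PySem.Chars.join_singleton, Js]
  | x :: t, v => by
    have ih := js_toList t x
    simp [PySem.Str.toList_join] at ih ⊢
    rw [PySem.Chars.join_cons_cons, ih]
    simp [Js]

theorem join_cons (l : List String) (v : String) :
    PySem.Str.join ", " (v :: l) = v ++ Js l := by
  have h : (PySem.Str.join ", " (v :: l)).toList = (v ++ Js l).toList := by
    simpa using js_toList l v
  exact String.toList_injective h

theorem loop_rest : ∀ (t : List (String × Bool)) (ret : String),
    mlLoop t ret true false = (ret ++ Js (t.map (·.1)), true, false)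
  | [], ret => by simp [mlLoop, Js]
  | (v, k) :: t, ret => by
    simp only [mlLoop]
    simp
    rw [loop_rest t]
    simp [Js, String.append_assoc]

theorem loop_none : ∀ (t : List (String × Bool)) (ret : String),
    t.findIdx? (fun p => !p.2) = none →
    mlLoop t ret false false = (ret ++ Js (t.map (·.1)), false, false)
  | [], ret, _ => by simp [mlLoop, Js]
  | (v, k) :: t, ret, h => by
    rw [List.findIdx?_cons] at h
    by_cases hk : k
    · subst hk
      rw [if_neg (by simp : ¬((!((v, true) : String × Bool).2) = true)), Option.map_eq_none_iff] at h
      simp only [mlLoop]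
      simp
      rw [loop_none t _ h]
      simp [Js, String.append_assoc]
    · simp only [Bool.not_eq_true] at hk; subst hk
      simp at h

theorem findIdx?_lt_length {α : Type} (p : α → Bool) :
    ∀ (t : List α) (s : Nat), t.findIdx? p = some s → s < t.length
  | [], s, h => by simp at h
  | x :: t, s, h => by
    rw [List.findIdx?_cons] at h
    by_cases hx : p x
    · rw [if_pos hx] at h
      obtain rfl : s = 0 := by simpa using h.symm
      simp only [List.length_cons]; omega
    · rw [if_neg hx] at h
      simp only [Option.map_eq_some_iff] at h
      rcases h with ⟨m, hm, rfl⟩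
      have := findIdx?_lt_length p t m hm
      simp only [List.length_cons]; omega

theorem str_lit_split : ("), arr, " : String) = "), arr" ++ ", " := by decide

theorem loop_some : ∀ (t : List (String × Bool)) (ret : String) (s : Nat),
    t.findIdx? (fun p => !p.2) = some s →
    mlLoop t ret false false =
      (ret ++ Js ((t.take s).map (·.1)) ++ "), arr" ++ Js ((t.drop s).map (·.1)), true, false)
  | [], ret, s, h => by simp at h
  | (v, k) :: t, ret, s, h => by
    rw [List.findIdx?_cons] at h
    by_cases hk : k
    · subst hk
      simp [Option.map_eq_some_iff] at h
      rcases h with ⟨m, hm, rfl⟩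
      simp only [mlLoop]
      simp
      rw [loop_some t _ m hm]
      simp [Js, String.append_assoc]
    · simp only [Bool.not_eq_true] at hk; subst hk
      simp at h
      obtain rfl : s = 0 := h.symm
      simp only [mlLoop]
      simp
      rw [loop_rest t]
      simp only [Js, List.map_cons, List.take_zero, List.map_nil, List.drop_zero]
      simp only [String.append_assoc, String.append_empty]

-- ===== VERDICT (by name: the statement is the Claim_ definition above) =====
theorem merge_lambdas_spec : Claim_equal_merge_lambdas := by
  intro arr _
  unfold Spec_merge_lambdas
  match arr with
  | [] => rfl
  | (v, k) :: t =>
    by_cases hk : k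
    · subst hk
      rcases hf : t.findIdx? (fun p => !p.2) with _ | s
      · -- no filter anywhere: one mapper phase then final "), arr"
        have hL := loop_none t ("lambda x, *rest: (" ++ v) hf
        have hB : ((v, true) :: t).findIdx? (fun p => !p.2) = none := by
          rw [List.findIdx?_cons]; simp [hf]
        unfold merge_lambdas merge_lambdas_alt
        simp only [hB, List.map_cons]
        simp only [mlLoop]
        simp
        rw [loop_none t _ hf, join_cons]
        simp [String.append_assoc]
      · -- first filter at position s+1
        have hB : ((v, true) :: t).findIdx? (fun p => !p.2) = some (s + 1) := by
          rw [List.findIdx?_cons]; simp [hf]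
        have hs : s < t.length := findIdx?_lt_length _ t s hf
        obtain ⟨w, r, hd⟩ : ∃ w r, t.drop s = w :: r := by
          rcases h' : t.drop s with _ | ⟨w, r⟩
          · exfalso; have := List.drop_eq_nil_iff.mp h'; omega
          · exact ⟨w, r, rfl⟩
        unfold merge_lambdas merge_lambdas_alt
        simp only [hB, List.map_cons, List.take_succ_cons, List.drop_succ_cons]
        simp only [mlLoop]
        simp
        rw [loop_some t _ s hf]
        simp
        rw [← List.map_take, ← List.map_drop, join_cons, hd, List.map_cons, join_cons,
            str_lit_split]
        simp only [Js, List.map_cons, String.append_assoc]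
    · simp only [Bool.not_eq_true] at hk; subst hk
      have hB : ((v, false) :: t).findIdx? (fun p => !p.2) = some 0 := by
        rw [List.findIdx?_cons]; simp
      unfold merge_lambdas merge_lambdas_alt
      simp only [hB, List.map_cons]
      simp only [mlLoop]
      simp
      rw [loop_rest t, join_cons]
      simp [String.append_assoc]
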